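-- pv_equiv track=rewrite | github.com/besforyou999/Baekjoon | 1941/main.py | is_adj
-- ===== SOURCE A (Python) =====
-- from collections import deque
--
-- dx = [0, 0, -1, 1]
--
-- dy = [-1, 1, 0, 0]
--
-- def is_adj(combo):
--     mat = [[0 for _ in range(5)] for _ in range(5)]
--     visited = [[False for _ in range(5)] for _ in range(5)]
--     start_y = 0
--     start_x = 0
--     for num in list(combo):
--         start_y = row = int(num / 5)
--         start_x = col = int(num % 5)
--         mat[row][col] = 1
--
--     count = 1
--     queue = deque()
--     queue.append((start_y, start_x))
--     visited[start_y][start_x] = True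
--
--     while queue:
--         y, x = queue.popleft()
--         for i in range(4):
--             ny = y + dy[i]
--             nx = x + dx[i]
--             if ny < 0 or nx < 0 or ny >= 5 or nx >= 5:
--                 continue
--             if mat[ny][nx] == 0 or visited[ny][nx] is True:
--                 continue
--
--             visited[ny][nx] = True
--             count += 1
--             queue.append((ny, nx))
--
--     if count == 7:
--         return True
--     return False
-- ===== SOURCE B (Python) =====
-- # Fixed-point flood fill over a set of cells instead of queue-based BFS.
-- def is_adj(combo):
--     cells = {(n // 5, n % 5) for n in combo}
--     start = (combo[-1] // 5, combo[-1] % 5) if combo else (0, 0)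
--     region = {start} if start in cells else set()
--     for _ in range(25):
--         region = region | ({(y + dy, x + dx) for (y, x) in region
--                             for (dy, dx) in ((-1, 0), (1, 0), (0, -1), (0, 1))} & cells)
--     return len(region) == 7
-- ===== Notes on version B (the rewrite author's own statement) =====
-- stated objective: alternative
-- what changed: Replaced the queue-based BFS with visited matrix and mutable count by a set-based fixed-point flood fill (grow the start cell's region by whole-frontier expansion until stable, compare its size to 7); Pre_ restricts to the task's natural domain of board cells 0..24, outside which A either raises IndexError or returns a value produced by Python negative-index wraparound.
-- outside the precondition, e.g. on is_adj([-21, -22, 0, 1, 2, 3, 4]): A returns True, B returns False; on is_adj([125]): A raises IndexError, B returns False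
import Mathlib
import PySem

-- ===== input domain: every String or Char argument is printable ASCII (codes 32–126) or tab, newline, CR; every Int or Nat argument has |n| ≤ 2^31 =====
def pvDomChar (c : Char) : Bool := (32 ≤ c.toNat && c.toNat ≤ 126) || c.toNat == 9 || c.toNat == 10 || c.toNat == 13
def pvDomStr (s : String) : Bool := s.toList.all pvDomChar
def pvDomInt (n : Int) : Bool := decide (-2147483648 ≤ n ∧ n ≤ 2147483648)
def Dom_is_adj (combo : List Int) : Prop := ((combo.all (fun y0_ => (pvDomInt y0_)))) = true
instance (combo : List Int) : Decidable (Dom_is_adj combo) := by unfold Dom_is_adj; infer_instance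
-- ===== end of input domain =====

-- B replaces A's queue-based BFS by a set-based fixed-point flood fill (alternative algorithm, same cost);
-- Pre_ restricts to the task's natural domain of board cells 0..24 (outside it A raises IndexError or
-- returns via Python negative-index wraparound, which the 2D-array model below does not reproduce).


-- ===== PORT A =====
-- dx = [0, 0, -1, 1] ; dy = [-1, 1, 0, 0]
def dxA : List Int := [0, 0, -1, 1]
def dyA : List Int := [-1, 1, 0, 0]

-- 5×5 Python lists-of-lists modelled as total functions; exact for the in-range indices
-- that A uses on Pre_ inputs (Pre_ excludes combos whose marks leave [0,5)×[0,5)).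
def set2I (m : Int → Int → Int) (r c v : Int) : Int → Int → Int :=
  fun y x => if y = r ∧ x = c then v else m y x
def set2B (m : Int → Int → Bool) (r c : Int) (v : Bool) : Int → Int → Bool :=
  fun y x => if y = r ∧ x = c then v else m y x

-- for num in list(combo): start_y = row = int(num/5); start_x = col = int(num%5); mat[row][col] = 1
-- int(num / 5) is truncating division, exact here (|num| small); int(num % 5) = num % 5 (Python mod).
def markStep (st : Int × Int × (Int → Int → Int)) (num : Int) : Int × Int × (Int → Int → Int) :=
  let row := num.tdiv 5
  let col := PySem.Int.mod num 5
  (row, col, set2I st.2.2 row col 1)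

-- the while-queue loop; fuel 64 strictly exceeds the loop's iteration count (≤ 26: one initial
-- element plus at most one enqueue per grid cell), as the proof below establishes.
def bfsLoop (mat : Int → Int → Int) :
    Nat → List (Int × Int) → (Int → Int → Bool) → Int → Int
  | _, [], _, count => count
  | 0, _ :: _, _, count => count          -- fuel exhaustion: unreachable (see proof)
  | fuel + 1, (y, x) :: queue, visited, count =>
      let s := (List.range 4).foldl
        (fun (s : (Int → Int → Bool) × Int × List (Int × Int)) i =>
          let ny := y + dyA.getD i 0
          let nx := x + dxA.getD i 0
          if ny < 0 ∨ nx < 0 ∨ 5 ≤ ny ∨ 5 ≤ nx then s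
          else if mat ny nx = 0 ∨ s.1 ny nx = true then s
          else (set2B s.1 ny nx true, s.2.1 + 1, s.2.2 ++ [(ny, nx)]))
        (visited, count, queue)
      bfsLoop mat fuel s.2.2 s.1 s.2.1

def is_adj (combo : List Int) : Bool :=
  let st := combo.foldl markStep (0, 0, fun _ _ => (0 : Int))
  let start_y := st.1
  let start_x := st.2.1
  let mat := st.2.2
  let visited := set2B (fun _ _ => false) start_y start_x true
  let count := bfsLoop mat 64 [(start_y, start_x)] visited 1
  if count = 7 then true else false

-- ===== PORT B =====
-- cells = {(n // 5, n % 5) for n in combo}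
def cellOf (n : Int) : Int × Int := (PySem.Int.floordiv n 5, PySem.Int.mod n 5)

-- region | ({(y+dy, x+dx) for (y,x) in region for (dy,dx) in ((-1,0),(1,0),(0,-1),(0,1))} & cells)
def floodStep (cells : PySem.Set (Int × Int)) (region : PySem.Set (Int × Int)) :
    PySem.Set (Int × Int) :=
  PySem.Set.union region
    (PySem.Set.inter
      (PySem.Set.ofList (region.flatMap
        (fun p => [(p.1 - 1, p.2), (p.1 + 1, p.2), (p.1, p.2 - 1), (p.1, p.2 + 1)])))
      cells)

def is_adj_alt (combo : List Int) : Bool :=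
  let cells : PySem.Set (Int × Int) := PySem.Set.ofList (combo.map cellOf)
  let start : Int × Int :=
    match combo.getLast? with          -- (combo[-1] // 5, combo[-1] % 5) if combo else (0, 0)
    | some n => cellOf n
    | none => (0, 0)
  let region0 : PySem.Set (Int × Int) :=
    if PySem.Set.contains cells start then PySem.Set.ofList [start] else PySem.Set.empty
  let region := (List.range 25).foldl (fun region _ => floodStep cells region) region0
  if region.length = 7 then true else false

-- ===== PRECONDITION & SPEC =====
-- Pre_ restricts to the natural domain of the task (board cells 0..24).  It excludes inputs with
-- out-of-range elements, on which A raises IndexError (elements < -29 or > 24) or returns a value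
-- only via Python's negative-index wraparound (elements -29..-1), an artefact the ports do not model.
def Pre_is_adj (combo : List Int) : Prop := ∀ n ∈ combo, 0 ≤ n ∧ n < 25
instance (combo : List Int) : Decidable (Pre_is_adj combo) := by unfold Pre_is_adj; infer_instance
def pvWitness_is_adj : List Int := [2, 3, 4, 7, 8, 9, 14]
def Spec_is_adj (combo : List Int) (out : Bool) : Prop := out = is_adj_alt combo
instance (combo : List Int) (out : Bool) : Decidable (Spec_is_adj combo out) := by unfold Spec_is_adj; infer_instance

-- ===== CLAIM (what is proved, stated in full; the proofs are below) =====
def Claim_equal_is_adj : Prop :=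
  ∀ (combo : List Int), Dom_is_adj combo → Pre_is_adj combo → Spec_is_adj combo (is_adj combo)

-- ===== LEMMAS AND PROOFS =====


-- abbreviations used only by the proofs

def nbrList (p : Int × Int) : List (Int × Int) :=
  [(p.1 - 1, p.2), (p.1 + 1, p.2), (p.1, p.2 - 1), (p.1, p.2 + 1)]

def dirs4 : List (Int × Int) := [(-1, 0), (1, 0), (0, -1), (0, 1)]

def grid : List (Int × Int) :=
  [(0, 0), (0, 1), (0, 2), (0, 3), (0, 4), (1, 0), (1, 1), (1, 2), (1, 3), (1, 4), (2, 0), (2, 1), (2, 2), (2, 3), (2, 4), (3, 0), (3, 1), (3, 2), (3, 3), (3, 4), (4, 0), (4, 1), (4, 2), (4, 3), (4, 4)]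

-- one direction of A's inner for-loop, as a named function (the port's fold is shown equal to it)
def dstep (mat : Int → Int → Int) (y x : Int) (s : (Int → Int → Bool) × Int × List (Int × Int))
    (d : Int × Int) : (Int → Int → Bool) × Int × List (Int × Int) :=
  let ny := y + d.1
  let nx := x + d.2
  if ny < 0 ∨ nx < 0 ∨ 5 ≤ ny ∨ 5 ≤ nx then s
  else if mat ny nx = 0 ∨ s.1 ny nx = true then s
  else (set2B s.1 ny nx true, s.2.1 + 1, s.2.2 ++ [(ny, nx)])

def regionN (cells : PySem.Set (Int × Int)) (start : Int × Int) : PySem.Set (Int × Int) :=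
  (floodStep cells)^[25] [start]

-- invariant of the BFS while-loop (state v = visited, c = count, q = queue), relative to
-- cells (the marked cells) and R (the flood-fill region, a fixpoint)
def LoopInv (cells R : List (Int × Int)) (start : Int × Int)
    (v : Int → Int → Bool) (c : Int) (q : List (Int × Int)) : Prop :=
  c = (grid.countP (fun p => v p.1 p.2) : Int) ∧
  (∀ p ∈ q, v p.1 p.2 = true) ∧
  (∀ p : Int × Int, v p.1 p.2 = true → p ∈ R) ∧
  (∀ p : Int × Int, v p.1 p.2 = true → p ∈ grid) ∧
  (∀ p : Int × Int, v p.1 p.2 = true → p ∉ q →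
      ∀ p' ∈ nbrList p, p' ∈ cells → v p'.1 p'.2 = true) ∧
  v start.1 start.2 = true

-- invariant inside the inner 4-direction fold, for popped cell yx and current state s
def MidInv (cells R : List (Int × Int)) (yx : Int × Int)
    (s : (Int → Int → Bool) × Int × List (Int × Int)) : Prop :=
  s.2.1 = (grid.countP (fun p => s.1 p.1 p.2) : Int) ∧
  (∀ p ∈ s.2.2, s.1 p.1 p.2 = true) ∧
  (∀ p : Int × Int, s.1 p.1 p.2 = true → p ∈ R) ∧
  (∀ p : Int × Int, s.1 p.1 p.2 = true → p ∈ grid) ∧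
  (∀ p : Int × Int, s.1 p.1 p.2 = true → p ∉ yx :: s.2.2 →
      ∀ p' ∈ nbrList p, p' ∈ cells → s.1 p'.1 p'.2 = true)

-- ----- generic small lemmas -----

theorem mem_grid {p : Int × Int} : p ∈ grid ↔ 0 ≤ p.1 ∧ p.1 < 5 ∧ 0 ≤ p.2 ∧ p.2 < 5 := by

  obtain ⟨y, x⟩ := p
  constructor
  · intro h
    fin_cases h <;> simp
  · rintro ⟨h1, h2, h3, h4⟩
    simp only at h1 h2 h3 h4
    interval_cases y <;> interval_cases x <;> decide

theorem nodup_grid : grid.Nodup := by decide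

theorem length_grid : grid.length = 25 := by decide

theorem countP_update_point {α : Type} [DecidableEq α] {g : List α} (hg : g.Nodup) {p : α}
    (hp : p ∈ g) {f f' : α → Bool} (hfp : f p = false) (hfp' : f' p = true)
    (hagree : ∀ q, q ≠ p → f' q = f q) : g.countP f' = g.countP f + 1 := by

  induction g with
  | nil => cases hp
  | cons a l ih =>
    rcases List.nodup_cons.mp hg with ⟨hal, hnl⟩
    rcases List.mem_cons.mp hp with rfl | hpl
    · have hcong : l.countP f' = l.countP f := by
        apply List.countP_congr
        intro q hq
        rw [hagree q (fun h => hal (h ▸ hq))]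
      simp [List.countP_cons, hfp, hfp', hcong]
    · have hap : a ≠ p := fun h => hal (h ▸ hpl)
      have : f' a = f a := hagree a hap
      simp only [List.countP_cons, this, ih hnl hpl]
      omega

theorem countP_mem_eq_length {g l : List (Int × Int)} (hg : g.Nodup) (hl : l.Nodup)
    (hsub : ∀ p ∈ l, p ∈ g) : g.countP (fun p => decide (p ∈ l)) = l.length := by

  have h1 : g.countP (fun p => decide (p ∈ l)) = (g.filter (fun p => decide (p ∈ l))).length := by
    rw [List.countP_eq_length_filter]
  rw [h1]
  have hperm : (g.filter (fun p => decide (p ∈ l))).Perm l := by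
    rw [List.perm_ext_iff_of_nodup (hg.filter _) hl]
    intro a
    simp only [List.mem_filter, decide_eq_true_eq]
    exact ⟨fun h => h.2, fun h => ⟨hsub a h, h⟩⟩
  exact hperm.length_eq


theorem foldl_range_const {α : Type} (g : α → α) (s : α) (n : Nat) :
    (List.range n).foldl (fun s _ => g s) s = g^[n] s := by

  induction n with
  | zero => simp
  | succ n ih =>
    rw [List.range_succ, List.foldl_append, ih]
    simp [Function.iterate_succ_apply']

theorem iterate_fix {α : Type} (g : α → α) (s : α) {k : Nat} (h : g^[k + 1] s = g^[k] s)
    {m : Nat} (hm : k ≤ m) : g^[m] s = g^[k] s := by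

  induction m, hm using Nat.le_induction with
  | base => rfl
  | succ m hm ih =>
    rw [Function.iterate_succ_apply', ih, ← Function.iterate_succ_apply' g k s, h]

-- ----- flood-fill (B) facts -----

theorem mem_floodStep {cells r : PySem.Set (Int × Int)} {p : Int × Int} :
    p ∈ floodStep cells r ↔ p ∈ r ∨ (p ∈ cells ∧ ∃ q ∈ r, p ∈ nbrList q) := by

  simp only [floodStep, PySem.Set.mem_union, PySem.Set.mem_inter, PySem.Set.mem_ofList,
    List.mem_flatMap, nbrList]
  tauto


theorem floodStep_append (cells r : PySem.Set (Int × Int)) :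
    ∃ ex, floodStep cells r = r ++ ex := by

  refine ⟨List.filter (fun y => !(PySem.Set.contains r y))
    (PySem.Set.ofList (PySem.Set.inter
      (PySem.Set.ofList (r.flatMap
        (fun p => [(p.1 - 1, p.2), (p.1 + 1, p.2), (p.1, p.2 - 1), (p.1, p.2 + 1)])))
      cells)), ?_⟩
  simp only [floodStep, PySem.Set.union]
  exact PySem.Set.update_eq_append_filter _ _

theorem nodup_floodStep (cells : PySem.Set (Int × Int)) {r : PySem.Set (Int × Int)}
    (hr : r.Nodup) : (floodStep cells r).Nodup := by

  exact PySem.Set.nodup_union _ _ hr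


theorem subset_floodStep {cells r : PySem.Set (Int × Int)} {p : Int × Int} (hp : p ∈ r) :
    p ∈ floodStep cells r := by

  exact mem_floodStep.mpr (Or.inl hp)


theorem mem_regionN_grid {cells : PySem.Set (Int × Int)} {start : Int × Int}
    (hc : ∀ p ∈ cells, p ∈ grid) (hs : start ∈ grid) :
    ∀ p ∈ regionN cells start, p ∈ grid := by

  have key : ∀ k : Nat, ∀ p ∈ (floodStep cells)^[k] [start], p ∈ grid := by
    intro k
    induction k with
    | zero => intro p hp; simp at hp; exact hp ▸ hs
    | succ k ih =>
      intro p hp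
      rw [Function.iterate_succ_apply'] at hp
      rcases mem_floodStep.mp hp with h | ⟨hc', _⟩
      · exact ih p h
      · exact hc p hc'
  exact key 25


theorem nodup_regionN (cells : PySem.Set (Int × Int)) (start : Int × Int) :
    (regionN cells start).Nodup := by

  have key : ∀ k : Nat, ((floodStep cells)^[k] [start]).Nodup := by
    intro k
    induction k with
    | zero => simp
    | succ k ih =>
      rw [Function.iterate_succ_apply']
      exact nodup_floodStep cells ih
  exact key 25


theorem start_mem_regionN (cells : PySem.Set (Int × Int)) (start : Int × Int) :
    start ∈ regionN cells start := by

  have key : ∀ k : Nat, start ∈ (floodStep cells)^[k] [start] := by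
    intro k
    induction k with
    | zero => simp
    | succ k ih =>
      rw [Function.iterate_succ_apply']
      exact subset_floodStep ih
  exact key 25


theorem regionN_fix {cells : PySem.Set (Int × Int)} {start : Int × Int}
    (hc : ∀ p ∈ cells, p ∈ grid) (hs : start ∈ grid) :
    floodStep cells (regionN cells start) = regionN cells start := by

  have hstab : ∃ k, k < 25 ∧ (floodStep cells)^[k + 1] [start] = (floodStep cells)^[k] [start] := by
    by_contra hcon
    push_neg at hcon
    have grow : ∀ k : Nat, k ≤ 25 → k + 1 ≤ ((floodStep cells)^[k] [start]).length := by
      intro k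
      induction k with
      | zero => intro _; simp
      | succ k ih =>
        intro hk
        have hlt : k < 25 := by omega
        obtain ⟨ex, hex⟩ := floodStep_append cells ((floodStep cells)^[k] [start])
        have hne := hcon k hlt
        rw [Function.iterate_succ_apply', hex]
        rw [Function.iterate_succ_apply', hex] at hne
        have hexne : ex ≠ [] := by
          intro h
          rw [h] at hne
          simp at hne
        have : 1 ≤ ex.length := by
          cases ex with
          | nil => exact absurd rfl hexne
          | cons a l => simp
        have := ih (by omega)
        simp only [List.length_append]
        omega
    have h26 := grow 25 le_rfl
    have hnd : ((floodStep cells)^[25] [start]).Nodup := by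
      have := nodup_regionN cells start
      simpa [regionN] using this
    have hsubg : ∀ p ∈ (floodStep cells)^[25] [start], p ∈ grid := by
      have := mem_regionN_grid hc hs
      simpa [regionN] using this
    have hcard : ((floodStep cells)^[25] [start]).length ≤ 25 := by
      have h1 : ((floodStep cells)^[25] [start]).toFinset.card =
          ((floodStep cells)^[25] [start]).length := List.toFinset_card_of_nodup hnd
      have h2 : ((floodStep cells)^[25] [start]).toFinset ⊆ grid.toFinset := by
        intro a ha
        rw [List.mem_toFinset] at ha ⊢
        exact hsubg a ha
      have h3 := Finset.card_le_card h2
      have h4 : grid.toFinset.card ≤ grid.length := List.toFinset_card_le grid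
      have h5 : grid.length = 25 := length_grid
      omega
    omega
  obtain ⟨k, hk, heq⟩ := hstab
  have h25 : (floodStep cells)^[25] [start] = (floodStep cells)^[k] [start] :=
    iterate_fix _ _ heq (by omega)
  show floodStep cells ((floodStep cells)^[25] [start]) = (floodStep cells)^[25] [start]
  rw [h25, ← Function.iterate_succ_apply' (floodStep cells) k [start], heq]


-- ----- BFS (A) facts -----

theorem nbr_of_dir {y x : Int} {d : Int × Int} (hd : d ∈ dirs4) :
    (y + d.1, x + d.2) ∈ nbrList (y, x) := by

  fin_cases hd <;> simp [nbrList, Prod.ext_iff] <;> omega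

theorem dir_of_nbr {y x : Int} {p' : Int × Int} (h : p' ∈ nbrList (y, x)) :
    ∃ d ∈ dirs4, p' = (y + d.1, x + d.2) := by

  simp only [nbrList, List.mem_cons, List.mem_singleton] at h
  rcases h with h | h | h | h
  · exact ⟨(-1, 0), by simp [dirs4], by simpa using h⟩
  · exact ⟨(1, 0), by simp [dirs4], by simpa using h⟩
  · exact ⟨(0, -1), by simp [dirs4], by simpa using h⟩
  · exact ⟨(0, 1), by simp [dirs4], by simpa using h⟩



theorem set2B_self (v : Int → Int → Bool) (r c : Int) : set2B v r c true r c = true := by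
  simp [set2B]

theorem set2B_mono {v : Int → Int → Bool} {r c a b : Int} (h : v a b = true) :
    set2B v r c true a b = true := by
  simp only [set2B]
  split_ifs <;> simp [h]

theorem set2B_true_iff {v : Int → Int → Bool} {r c a b : Int} :
    set2B v r c true a b = true ↔ (v a b = true ∨ (a = r ∧ b = c)) := by
  simp only [set2B]
  split_ifs with h <;> simp [h]

-- one inner-loop direction preserves the mid-invariant (and all the bookkeeping)
theorem dstep_mid {cells R : List (Int × Int)} {mat : Int → Int → Int} {y x : Int}
    {s : (Int → Int → Bool) × Int × List (Int × Int)} {d : Int × Int}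
    (hmat : ∀ a b : Int, mat a b ≠ 0 ↔ ((a, b) : Int × Int) ∈ cells)
    (hcg : ∀ p ∈ cells, p ∈ grid)
    (hfix : floodStep cells R = R)
    (hyx : ((y, x) : Int × Int) ∈ R)
    (hd : d ∈ dirs4)
    (hmid : MidInv cells R (y, x) s) :
    MidInv cells R (y, x) (dstep mat y x s d) ∧
    (∀ p : Int × Int, s.1 p.1 p.2 = true → (dstep mat y x s d).1 p.1 p.2 = true) ∧
    (∀ p ∈ s.2.2, p ∈ (dstep mat y x s d).2.2) ∧
    (grid.countP (fun p => !(dstep mat y x s d).1 p.1 p.2) + (dstep mat y x s d).2.2.length ≤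
      grid.countP (fun p => !s.1 p.1 p.2) + s.2.2.length) ∧
    ((y + d.1, x + d.2) ∈ cells → (dstep mat y x s d).1 (y + d.1) (x + d.2) = true) := by

  obtain ⟨hcnt, hqv, hsound, hgridv, hclosed⟩ := hmid
  simp only [dstep]
  split_ifs with hb hv
  · -- out of bounds: state unchanged
    refine ⟨⟨hcnt, hqv, hsound, hgridv, hclosed⟩, fun p h => h, fun p h => h, le_rfl, ?_⟩
    intro hcell
    exfalso
    have hg := mem_grid.mp (hcg _ hcell)
    simp only at hg
    rcases hb with h | h | h | h <;> omega
  · -- unmarked or already visited: state unchanged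
    refine ⟨⟨hcnt, hqv, hsound, hgridv, hclosed⟩, fun p h => h, fun p h => h, le_rfl, ?_⟩
    intro hcell
    rcases hv with h0 | hvis
    · exact absurd hcell (fun hc => ((hmat _ _).mpr hc) h0)
    · exact hvis
  · -- fresh cell: visit it, bump the count, enqueue it
    push_neg at hb hv
    obtain ⟨hb1, hb2, hb3, hb4⟩ := hb
    obtain ⟨hv1, hv2⟩ := hv
    have hv2' : s.1 (y + d.1) (x + d.2) = false := by
      cases h : s.1 (y + d.1) (x + d.2)
      · rfl
      · exact absurd h hv2
    have hmemgrid : ((y + d.1, x + d.2) : Int × Int) ∈ grid := by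
      rw [mem_grid]
      exact ⟨by omega, by omega, by omega, by omega⟩
    have hcells : ((y + d.1, x + d.2) : Int × Int) ∈ cells := (hmat _ _).mp hv1
    have hmemR : ((y + d.1, x + d.2) : Int × Int) ∈ R := by
      rw [← hfix]
      exact mem_floodStep.mpr (Or.inr ⟨hcells, (y, x), hyx, nbr_of_dir hd⟩)
    have hmono : ∀ p : Int × Int, s.1 p.1 p.2 = true →
        set2B s.1 (y + d.1) (x + d.2) true p.1 p.2 = true := fun p h => set2B_mono h
    have hcount : grid.countP (fun p => set2B s.1 (y + d.1) (x + d.2) true p.1 p.2) =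
        grid.countP (fun p => s.1 p.1 p.2) + 1 := by
      apply countP_update_point nodup_grid hmemgrid (f := fun p => s.1 p.1 p.2)
      · exact hv2'
      · exact set2B_self _ _ _
      · intro q hq
        simp only [set2B]
        rw [if_neg]
        intro ⟨e1, e2⟩
        exact hq (Prod.ext e1 e2)
    have hmeas : grid.countP (fun p => !s.1 p.1 p.2) =
        grid.countP (fun p => !set2B s.1 (y + d.1) (x + d.2) true p.1 p.2) + 1 := by
      apply countP_update_point nodup_grid hmemgrid
        (f := fun p => !set2B s.1 (y + d.1) (x + d.2) true p.1 p.2)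
      · simp [set2B_self]
      · simp [hv2']
      · intro q hq
        simp only [set2B]
        rw [if_neg]
        intro ⟨e1, e2⟩
        exact hq (Prod.ext e1 e2)
    refine ⟨⟨?_, ?_, ?_, ?_, ?_⟩, hmono, ?_, ?_, ?_⟩
    · -- count
      simp only [hcnt, hcount]
      push_cast
      ring
    · -- queue all visited
      intro p hp
      rcases List.mem_append.mp hp with h | h
      · exact hmono p (hqv p h)
      · rcases List.mem_singleton.mp h with rfl
        exact set2B_self _ _ _
    · -- soundness
      intro p hp
      rcases set2B_true_iff.mp hp with h | ⟨e1, e2⟩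
      · exact hsound p h
      · have : p = (y + d.1, x + d.2) := Prod.ext e1 e2
        rw [this]
        exact hmemR
    · -- in grid
      intro p hp
      rcases set2B_true_iff.mp hp with h | ⟨e1, e2⟩
      · exact hgridv p h
      · have : p = (y + d.1, x + d.2) := Prod.ext e1 e2
        rw [this]
        exact hmemgrid
    · -- closedness
      intro p hp hnotin p' hp' hcell'
      have hpne : p ≠ (y + d.1, x + d.2) := by
        intro h
        exact hnotin (by rw [h]; exact List.mem_cons_of_mem _ (List.mem_append_right _ (List.mem_singleton.mpr rfl)))
      have hpv : s.1 p.1 p.2 = true := by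
        rcases set2B_true_iff.mp hp with h | ⟨e1, e2⟩
        · exact h
        · exact absurd (Prod.ext e1 e2) hpne
      have hpnotin : p ∉ ((y, x) : Int × Int) :: s.2.2 := by
        intro h
        rcases List.mem_cons.mp h with rfl | h'
        · exact hnotin List.mem_cons_self
        · exact hnotin (List.mem_cons_of_mem _ (List.mem_append_left _ h'))
      exact hmono p' (hclosed p hpv hpnotin p' hp' hcell')
    · -- queue grows
      intro p hp
      exact List.mem_append_left _ hp
    · -- measure
      simp only [List.length_append, List.length_singleton]
      omega
    · -- coverage
      intro _
      exact set2B_self _ _ _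

-- the port's inner fold over range 4 is the four direction steps
theorem inner_fold_eq (mat : Int → Int → Int) (y x : Int)
    (s : (Int → Int → Bool) × Int × List (Int × Int)) :
    (List.range 4).foldl
      (fun (s : (Int → Int → Bool) × Int × List (Int × Int)) i =>
        let ny := y + dyA.getD i 0
        let nx := x + dxA.getD i 0
        if ny < 0 ∨ nx < 0 ∨ 5 ≤ ny ∨ 5 ≤ nx then s
        else if mat ny nx = 0 ∨ s.1 ny nx = true then s
        else (set2B s.1 ny nx true, s.2.1 + 1, s.2.2 ++ [(ny, nx)])) s =
      dirs4.foldl (dstep mat y x) s := by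

  have h4 : List.range 4 = [0, 1, 2, 3] := rfl
  rw [h4]
  simp only [dirs4, List.foldl, dyA, dxA, List.getD_cons_zero, List.getD_cons_succ, dstep]


theorem bfs_done {cells R : List (Int × Int)} {start : Int × Int}
    {v : Int → Int → Bool} {c : Int}
    (hR0 : R = regionN cells start) (hRnd : R.Nodup) (hRg : ∀ p ∈ R, p ∈ grid)
    (hinv : LoopInv cells R start v c []) : c = (R.length : Int) := by
  obtain ⟨hcnt, -, hsound, -, hclosed, hstart⟩ := hinv
  have hsup : ∀ k : Nat, ∀ p ∈ (floodStep cells)^[k] [start], v p.1 p.2 = true := by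
    intro k
    induction k with
    | zero =>
      intro p hp
      rcases List.mem_singleton.mp hp with rfl
      exact hstart
    | succ k ih =>
      intro p hp
      rw [Function.iterate_succ_apply'] at hp
      rcases mem_floodStep.mp hp with h | ⟨hc', q', hq', hnbr⟩
      · exact ih p h
      · exact hclosed q' (ih q' hq') (List.not_mem_nil) p hnbr hc'
  have hiff : ∀ p : Int × Int, v p.1 p.2 = true ↔ p ∈ R := by
    intro p
    constructor
    · exact hsound p
    · intro hp
      rw [hR0] at hp
      exact hsup 25 p hp
  have hcong : grid.countP (fun p => v p.1 p.2) = grid.countP (fun p => decide (p ∈ R)) := by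
    apply List.countP_congr
    intro a _
    simp [hiff a]
  rw [hcnt, hcong, countP_mem_eq_length nodup_grid hRnd hRg]

-- the whole while-loop: given the invariant and enough fuel, it returns |R|
theorem bfs_run {cells R : List (Int × Int)} {mat : Int → Int → Int} {start : Int × Int}
    (hmat : ∀ a b : Int, mat a b ≠ 0 ↔ ((a, b) : Int × Int) ∈ cells)
    (hcg : ∀ p ∈ cells, p ∈ grid)
    (hfix : floodStep cells R = R)
    (hR0 : R = regionN cells start)
    (hRg : ∀ p ∈ R, p ∈ grid) (hRnd : R.Nodup) :
    ∀ (fuel : Nat) (q : List (Int × Int)) (v : Int → Int → Bool) (c : Int),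
      LoopInv cells R start v c q →
      grid.countP (fun p => !v p.1 p.2) + q.length ≤ fuel →
      bfsLoop mat fuel q v c = (R.length : Int) := by

  intro fuel
  induction fuel with
  | zero =>
    intro q v c hinv hmeas
    cases q with
    | nil => exact bfs_done hR0 hRnd hRg hinv
    | cons p rest =>
      exfalso
      simp only [List.length_cons] at hmeas
      omega
  | succ fuel ih =>
    intro q v c hinv hmeas
    cases q with
    | nil => exact bfs_done hR0 hRnd hRg hinv
    | cons hd rest =>
      obtain ⟨y, x⟩ := hd
      obtain ⟨hcnt, hqv, hsound, hgridv, hclosed, hstart⟩ := hinv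
      have hvyx : v y x = true := hqv (y, x) List.mem_cons_self
      have hyxR : ((y, x) : Int × Int) ∈ R := hsound (y, x) hvyx
      have hmid0 : MidInv cells R (y, x) (v, c, rest) := by
        refine ⟨hcnt, ?_, hsound, hgridv, ?_⟩
        · intro p hp
          exact hqv p (List.mem_cons_of_mem _ hp)
        · exact hclosed
      simp only [bfsLoop]
      rw [inner_fold_eq]
      have hfold : dirs4.foldl (dstep mat y x) (v, c, rest)
          = dstep mat y x (dstep mat y x (dstep mat y x
              (dstep mat y x (v, c, rest) (-1, 0)) (1, 0)) (0, -1)) (0, 1) := by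
        simp only [dirs4, List.foldl]
      rw [hfold]
      obtain ⟨hm1, mono1, qs1, meas1, cov1⟩ :=
        dstep_mid (d := (-1, 0)) hmat hcg hfix hyxR (by simp [dirs4]) hmid0
      obtain ⟨hm2, mono2, qs2, meas2, cov2⟩ :=
        dstep_mid (d := (1, 0)) hmat hcg hfix hyxR (by simp [dirs4]) hm1
      obtain ⟨hm3, mono3, qs3, meas3, cov3⟩ :=
        dstep_mid (d := (0, -1)) hmat hcg hfix hyxR (by simp [dirs4]) hm2
      obtain ⟨hm4, mono4, qs4, meas4, cov4⟩ :=
        dstep_mid (d := (0, 1)) hmat hcg hfix hyxR (by simp [dirs4]) hm3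
      set s1 := dstep mat y x (v, c, rest) (-1, 0) with hs1
      set s2 := dstep mat y x s1 (1, 0) with hs2
      set s3 := dstep mat y x s2 (0, -1) with hs3
      set s4 := dstep mat y x s3 (0, 1) with hs4
      obtain ⟨h4cnt, h4qv, h4sound, h4grid, h4closed⟩ := hm4
      have hmono23 : ∀ p : Int × Int, s1.1 p.1 p.2 = true → s4.1 p.1 p.2 = true :=
        fun p h => mono4 p (mono3 p (mono2 p h))
      have hmono14 : ∀ p : Int × Int, v p.1 p.2 = true → s4.1 p.1 p.2 = true :=
        fun p h => hmono23 p (mono1 p h)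
      have hinv4 : LoopInv cells R start s4.1 s4.2.1 s4.2.2 := by
        refine ⟨h4cnt, h4qv, h4sound, h4grid, ?_, hmono14 start hstart⟩
        intro p hp hnot p' hp' hc'
        by_cases hpe : p = (y, x)
        · subst hpe
          obtain ⟨d, hd, rfl⟩ := dir_of_nbr hp'
          fin_cases hd
          · exact hmono23 _ (cov1 hc')
          · exact mono4 _ (mono3 _ (cov2 hc'))
          · exact mono4 _ (cov3 hc')
          · exact cov4 hc'
        · refine h4closed p hp ?_ p' hp' hc'
          intro h
          rcases List.mem_cons.mp h with h' | h'
          · exact hpe h'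
          · exact hnot h'
      have hmeas4 : grid.countP (fun p => !s4.1 p.1 p.2) + s4.2.2.length ≤ fuel := by
        dsimp only at meas1
        simp only [List.length_cons] at hmeas
        omega
      exact ih s4.2.2 s4.1 s4.2.1 hinv4 hmeas4

-- ----- marking-pass (A) vs cells/start (B) -----

theorem markFold_coord (combo : List Int) :
    ∀ init : Int × Int × (Int → Int → Int),
      ((combo.foldl markStep init).1, (combo.foldl markStep init).2.1) =
        (match combo.getLast? with
          | some n => (n.tdiv 5, PySem.Int.mod n 5)
          | none => (init.1, init.2.1)) := by

  induction combo with
  | nil => intro init; simp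
  | cons n l ih =>
    intro init
    rw [List.foldl_cons]
    cases l with
    | nil => simp [markStep]
    | cons m l' =>
      rw [List.getLast?_cons_cons]
      have h := ih (markStep init n)
      have hsome : (m :: l').getLast?.isSome := by simp [List.getLast?_isSome]
      obtain ⟨a, ha⟩ := Option.isSome_iff_exists.mp hsome
      rw [ha] at h ⊢
      exact h


theorem markFold_mat (combo : List Int) :
    ∀ (init : Int × Int × (Int → Int → Int)) (y x : Int),
      (combo.foldl markStep init).2.2 y x =
        if ∃ n ∈ combo, n.tdiv 5 = y ∧ PySem.Int.mod n 5 = x then 1 else init.2.2 y x := by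

  induction combo with
  | nil => intro init y x; simp
  | cons n l ih =>
    intro init y x
    rw [List.foldl_cons, ih (markStep init n) y x]
    simp only [markStep, set2I]
    by_cases h1 : ∃ m ∈ l, m.tdiv 5 = y ∧ PySem.Int.mod m 5 = x
    · have h1' : ∃ m ∈ n :: l, m.tdiv 5 = y ∧ PySem.Int.mod m 5 = x := by
        obtain ⟨m, hm, he⟩ := h1
        exact ⟨m, List.mem_cons_of_mem n hm, he⟩
      rw [if_pos h1, if_pos h1']
    · rw [if_neg h1]
      by_cases h2 : y = n.tdiv 5 ∧ x = PySem.Int.mod n 5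
      · rw [if_pos h2, if_pos ⟨n, List.mem_cons_self, h2.1.symm, h2.2.symm⟩]
      · rw [if_neg h2, if_neg ?_]
        rintro ⟨m, hm, he1, he2⟩
        rcases List.mem_cons.mp hm with rfl | hml
        · exact h2 ⟨he1.symm, he2.symm⟩
        · exact h1 ⟨m, hml, he1, he2⟩

theorem cellOf_eq {n : Int} (h0 : 0 ≤ n) (h1 : n < 25) :
    cellOf n = (n.tdiv 5, PySem.Int.mod n 5) := by

  unfold cellOf PySem.Int.floordiv PySem.Int.mod
  interval_cases n <;> decide


theorem cellOf_mem_grid {n : Int} (h0 : 0 ≤ n) (h1 : n < 25) : cellOf n ∈ grid := by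

  unfold cellOf PySem.Int.floordiv PySem.Int.mod
  interval_cases n <;> decide


-- ===== VERDICT (by name: the statement is the Claim_ definition above) =====
theorem is_adj_spec : Claim_equal_is_adj := by
  intro combo _ hpre
  unfold Spec_is_adj
  by_cases hco : combo = []
  · subst hco
    rfl
  · -- nonempty combo: the last element determines the start cell
    have hmem : combo.getLast hco ∈ combo := List.getLast_mem hco
    obtain ⟨hl0, hl25⟩ := hpre _ hmem
    set lst := combo.getLast hco with hlst
    have hlast? : combo.getLast? = some lst := by
      rw [hlst, List.getLast?_eq_some_getLast]
    set cells := PySem.Set.ofList (combo.map cellOf) with hcellsdef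
    set start := cellOf lst with hstartdef
    have hcg : ∀ p ∈ cells, p ∈ grid := by
      intro p hp
      rw [hcellsdef, PySem.Set.mem_ofList] at hp
      obtain ⟨n, hn, rfl⟩ := List.mem_map.mp hp
      obtain ⟨h0, h25⟩ := hpre n hn
      exact cellOf_mem_grid h0 h25
    have hstartmem : start ∈ cells := by
      rw [hcellsdef, PySem.Set.mem_ofList]
      exact List.mem_map.mpr ⟨lst, hmem, rfl⟩
    have hstartgrid : start ∈ grid := cellOf_mem_grid hl0 hl25
    set R := regionN cells start with hRdef
    have hfix := regionN_fix (start := start) hcg hstartgrid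
    have hRg := mem_regionN_grid (start := start) hcg hstartgrid
    have hRnd := nodup_regionN cells start
    have hstartR := start_mem_regionN cells start
    -- A's side equals (if |R| = 7 then true else false)
    have hAeq : is_adj combo = (if (R.length : Int) = 7 then true else false) := by
      unfold is_adj
      dsimp only
      have hcoord := markFold_coord combo (0, 0, fun _ _ => (0 : Int))
      rw [hlast?] at hcoord
      have hce : cellOf lst = (lst.tdiv 5, PySem.Int.mod lst 5) := cellOf_eq hl0 hl25
      have hst1 : (combo.foldl markStep (0, 0, fun _ _ => (0 : Int))).1 = start.1 := by
        rw [hstartdef, hce]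
        exact congrArg Prod.fst hcoord
      have hst2 : (combo.foldl markStep (0, 0, fun _ _ => (0 : Int))).2.1 = start.2 := by
        rw [hstartdef, hce]
        exact congrArg Prod.snd hcoord
      rw [hst1, hst2]
      have hmat : ∀ a b : Int,
          (combo.foldl markStep (0, 0, fun _ _ => (0 : Int))).2.2 a b ≠ 0 ↔
            ((a, b) : Int × Int) ∈ cells := by
        intro a b
        rw [markFold_mat]
        split_ifs with h
        · simp only [ne_eq, one_ne_zero, not_false_eq_true, true_iff]
          obtain ⟨n, hn, h1, h2⟩ := h
          rw [hcellsdef, PySem.Set.mem_ofList]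
          refine List.mem_map.mpr ⟨n, hn, ?_⟩
          rw [cellOf_eq (hpre n hn).1 (hpre n hn).2]
          exact Prod.ext h1 h2
        · simp only [ne_eq, not_true_eq_false, false_iff]
          intro hmem'
          rw [hcellsdef, PySem.Set.mem_ofList] at hmem'
          obtain ⟨n, hn, hcell⟩ := List.mem_map.mp hmem'
          rw [cellOf_eq (hpre n hn).1 (hpre n hn).2] at hcell
          exact h ⟨n, hn, congrArg Prod.fst hcell, congrArg Prod.snd hcell⟩
      -- initial invariant for the BFS loop
      have hv0start : set2B (fun _ _ => false) start.1 start.2 true start.1 start.2 = true :=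
        set2B_self _ _ _
      have hv0only : ∀ p : Int × Int,
          set2B (fun _ _ => false) start.1 start.2 true p.1 p.2 = true → p = start := by
        intro p hp
        rcases set2B_true_iff.mp hp with h | ⟨e1, e2⟩
        · cases h
        · exact Prod.ext e1 e2
      have hinv0 : LoopInv cells R start
          (set2B (fun _ _ => false) start.1 start.2 true) 1 [(start.1, start.2)] := by
        refine ⟨?_, ?_, ?_, ?_, ?_, hv0start⟩
        · have h0 : grid.countP (fun p => (fun _ _ => false) p.1 p.2) = 0 := by simp
          have h1 : grid.countP
              (fun p => set2B (fun _ _ => false) start.1 start.2 true p.1 p.2) =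
              grid.countP (fun p => (fun _ _ => false) p.1 p.2) + 1 := by
            apply countP_update_point nodup_grid (p := start) hstartgrid
            · rfl
            · exact set2B_self _ _ _
            · intro q hq
              simp only [set2B]
              rw [if_neg]
              intro ⟨e1, e2⟩
              exact hq (Prod.ext e1 e2)
          rw [h1, h0]
          norm_num
        · intro p hp
          rcases List.mem_singleton.mp hp with rfl
          exact set2B_self _ _ _
        · intro p hp
          rw [hv0only p hp]
          exact hstartR
        · intro p hp
          rw [hv0only p hp]
          exact hstartgrid
        · intro p hp hnot
          exfalso
          apply hnot
          rw [hv0only p hp]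
          simp
      have hmeas0 : grid.countP
          (fun p => !set2B (fun _ _ => false) start.1 start.2 true p.1 p.2) +
          ([((start.1 : Int), (start.2 : Int))].length) ≤ 64 := by
        have h1 := List.countP_le_length
          (p := fun p : Int × Int => !set2B (fun _ _ => false) start.1 start.2 true p.1 p.2)
          (l := grid)
        have h2 : grid.length = 25 := length_grid
        simp only [List.length_singleton]
        omega
      have hA := bfs_run hmat hcg hfix hRdef hRg hRnd 64 [(start.1, start.2)]
        (set2B (fun _ _ => false) start.1 start.2 true) 1 hinv0 hmeas0
      rw [hA]
    -- B's side equals (if |R| = 7 then true else false)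
    have hBeq : is_adj_alt combo = (if R.length = 7 then true else false) := by
      unfold is_adj_alt
      dsimp only
      rw [hlast?]
      have hcontains : PySem.Set.contains (PySem.Set.ofList (combo.map cellOf)) (cellOf lst)
          = true := by
        rw [PySem.Set.contains_iff]
        exact hstartmem
      rw [hcontains]
      have hsingle : PySem.Set.ofList [cellOf lst] = [cellOf lst] := rfl
      rw [if_pos rfl, hsingle,
        foldl_range_const (g := floodStep (PySem.Set.ofList (combo.map cellOf)))]
      rfl
    rw [hAeq, hBeq]
    by_cases h7 : R.length = 7
    · rw [if_pos h7, if_pos (by exact_mod_cast h7)]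
    · rw [if_neg h7, if_neg (by exact_mod_cast h7)]
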